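-- pv_equiv track=rewrite | github.com/MiguelColonia/kirendering | backend/src/cimiento/render/blender_compat.py | choose_sky_type
-- ===== SOURCE A (Python) =====
-- from collections.abc import Iterable
--
-- def choose_sky_type(available_types: Iterable[str]) -> str:
--     """Elige el sky_type más compatible posible según la versión de Blender."""
--     available = set(available_types)
--     preferred_order = (
--         "NISHITA",
--         "MULTIPLE_SCATTERING",
--         "SINGLE_SCATTERING",
--         "PREETHAM",
--         "HOSEK_WILKIE",
--     )
--
--     for sky_type in preferred_order:
--         if sky_type in available:
--             return sky_type
--
--     raise ValueError(f"No hay sky_type compatible en Blender: {sorted(available)}")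
-- ===== SOURCE B (Python) =====
-- def choose_sky_type(available_types):
--     """Elige el sky_type más compatible posible según la versión de Blender."""
--     preferred_order = (
--         "NISHITA",
--         "MULTIPLE_SCATTERING",
--         "SINGLE_SCATTERING",
--         "PREETHAM",
--         "HOSEK_WILKIE",
--     )
--     rank = {t: i for i, t in enumerate(preferred_order)}
--     available = list(available_types)
--     candidates = [t for t in available if t in rank]
--     if not candidates:
--         raise ValueError(f"No hay sky_type compatible en Blender: {sorted(set(available))}")
--     return min(candidates, key=rank.get)
-- ===== Notes on version B (the rewrite author's own statement) =====
-- stated objective: alternative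
-- what changed: Instead of scanning the fixed preference order and testing each against a set of the input, B builds a rank table over the preferences once, scans the input data selecting ranked candidates, and returns the candidate of minimal rank via min(key=rank.get).
import Mathlib
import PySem

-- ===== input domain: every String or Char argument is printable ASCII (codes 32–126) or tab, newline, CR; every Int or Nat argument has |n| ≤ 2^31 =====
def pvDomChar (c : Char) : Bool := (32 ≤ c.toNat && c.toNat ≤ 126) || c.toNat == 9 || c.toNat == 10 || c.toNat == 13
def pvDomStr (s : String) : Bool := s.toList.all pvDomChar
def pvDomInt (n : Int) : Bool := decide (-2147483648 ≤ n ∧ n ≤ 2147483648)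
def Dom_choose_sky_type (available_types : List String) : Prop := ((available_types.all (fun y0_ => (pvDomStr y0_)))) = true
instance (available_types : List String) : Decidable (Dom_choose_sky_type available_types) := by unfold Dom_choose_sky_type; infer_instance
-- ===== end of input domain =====

-- B replaces A's scan of the fixed preference order (membership-testing a set of the input)
-- by one scan of the input selecting ranked candidates and taking the minimum-rank one (objective: alternative).

-- ===== PORT A =====
def prefOrder : List String :=
  ["NISHITA", "MULTIPLE_SCATTERING", "SINGLE_SCATTERING", "PREETHAM", "HOSEK_WILKIE"]

-- the for-loop with early return over the preference tuple
def loopA : List String → PySem.Set String → Option String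
  | [], _ => none
  | s :: rest, av => if PySem.Set.contains av s then some s else loopA rest av

def choose_sky_type (available_types : List String) : String :=
  let available := PySem.Set.ofList available_types
  -- none = the final 'raise ValueError' (excluded by Pre_)
  (loopA prefOrder available).getD ""

-- ===== PORT B =====
-- rank = {t: i for i, t in enumerate(preferred_order)}
def rankB : PySem.Dict String Int :=
  (PySem.List.enumerate prefOrder 0).foldl (fun d p => d.insert p.2 p.1) PySem.Dict.empty

def choose_sky_type_alt (available_types : List String) : String :=
  let candidates := available_types.filter (fun t => (rankB.get? t).isSome)
  -- empty candidates = the 'raise ValueError' (excluded by Pre_)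
  match PySem.List.min? candidates (fun t => (rankB.get? t).getD 0) with
  | some m => m
  | none => ""

-- ===== PRECONDITION & SPEC =====
-- Pre_ excludes exactly the inputs containing no preferred sky_type, on which A raises ValueError (B raises the same ValueError).
def Pre_choose_sky_type (available_types : List String) : Prop :=
  ∃ s ∈ prefOrder, s ∈ available_types

instance (available_types : List String) : Decidable (Pre_choose_sky_type available_types) := by
  unfold Pre_choose_sky_type; infer_instance

def pvWitness_choose_sky_type : List String := ["fog", "PREETHAM"]

def Spec_choose_sky_type (available_types : List String) (out : String) : Prop :=
  out = choose_sky_type_alt available_types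

instance (available_types : List String) (out : String) : Decidable (Spec_choose_sky_type available_types out) := by
  unfold Spec_choose_sky_type; infer_instance

-- ===== CLAIM =====
def Claim_equal_choose_sky_type : Prop :=
  ∀ (available_types : List String), Dom_choose_sky_type available_types →
    Pre_choose_sky_type available_types →
    Spec_choose_sky_type available_types (choose_sky_type available_types)

-- ===== LEMMAS AND PROOFS =====
-- rank of a preferred string = its index in prefOrder; 5 for anything else
def rk (s : String) : Nat :=
  if s = "NISHITA" then 0
  else if s = "MULTIPLE_SCATTERING" then 1
  else if s = "SINGLE_SCATTERING" then 2
  else if s = "PREETHAM" then 3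
  else if s = "HOSEK_WILKIE" then 4
  else 5

def pstr : Nat → String
  | 0 => "NISHITA"
  | 1 => "MULTIPLE_SCATTERING"
  | 2 => "SINGLE_SCATTERING"
  | 3 => "PREETHAM"
  | _ => "HOSEK_WILKIE"

theorem pstr_rk (s : String) (hs : s ∈ prefOrder) : pstr (rk s) = s := by
  fin_cases hs <;> rfl

theorem rk_le (s : String) (hs : s ∈ prefOrder) : rk s ≤ 4 := by
  fin_cases hs <;> decide

theorem rankB_isSome (s : String) : ((rankB.get? s).isSome = true) ↔ s ∈ prefOrder := by
  by_cases h1 : s = "NISHITA"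
  · subst h1; decide
  by_cases h2 : s = "MULTIPLE_SCATTERING"
  · subst h2; decide
  by_cases h3 : s = "SINGLE_SCATTERING"
  · subst h3; decide
  by_cases h4 : s = "PREETHAM"
  · subst h4; decide
  by_cases h5 : s = "HOSEK_WILKIE"
  · subst h5; decide
  constructor
  · intro h
    exfalso
    have hd : rankB = PySem.Dict.mk [("NISHITA",0),("MULTIPLE_SCATTERING",1),("SINGLE_SCATTERING",2),("PREETHAM",3),("HOSEK_WILKIE",4)] := by decide
    rw [hd] at h
    simp [PySem.Dict.get?] at h
    rcases h with h | h | h | h | h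
    exacts [h1 h.symm, h2 h.symm, h3 h.symm, h4 h.symm, h5 h.symm]
  · intro h
    simp [prefOrder, h1, h2, h3, h4, h5] at h

theorem rankB_key (s : String) (hs : s ∈ prefOrder) : (rankB.get? s).getD 0 = (rk s : Int) := by
  fin_cases hs <;> decide

-- the step of Python's min-with-key fold (the body of PySem.List.min?)
def minStep (acc : Option String) (x : String) : Option String :=
  match acc with
  | none => some x
  | some m => if (rankB.get? x).getD 0 < (rankB.get? m).getD 0 then some x else some m

theorem min?_eq_foldl_minStep (xs : List String) :
    PySem.List.min? xs (fun t => (rankB.get? t).getD 0) = xs.foldl minStep none := by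
  unfold PySem.List.min?
  apply List.foldl_ext
  intro acc x _
  cases acc <;> rfl

-- the running min of ranks over a list of preferred strings, as Python's min-with-key fold
theorem foldl_min_pstr (t : List String) :
    ∀ (b : String), b ∈ prefOrder → (∀ x ∈ t, x ∈ prefOrder) →
    List.foldl minStep (some b) t
    = some (pstr (List.foldl (fun n x => Nat.min n (rk x)) (rk b) t)) := by
  induction t with
  | nil => intro b hb _; simp [pstr_rk b hb]
  | cons x t ih =>
    intro b hb hall
    have hx : x ∈ prefOrder := hall x (by simp)
    have hall' : ∀ y ∈ t, y ∈ prefOrder := fun y hy => hall y (by simp [hy])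
    simp only [List.foldl_cons, minStep]
    rw [rankB_key x hx, rankB_key b hb]
    by_cases hlt : rk x < rk b
    · rw [if_pos (by exact_mod_cast hlt)]
      rw [ih x hx hall']
      have hmin : Nat.min (rk b) (rk x) = rk x := by unfold Nat.min; omega
      rw [hmin]
    · rw [if_neg (by exact_mod_cast hlt)]
      rw [ih b hb hall']
      have hmin : Nat.min (rk b) (rk x) = rk b := by unfold Nat.min; omega
      rw [hmin]

theorem foldl_min_facts (t : List String) :
    ∀ (a : Nat),
      (List.foldl (fun n x => Nat.min n (rk x)) a t ≤ a) ∧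
      (∀ y ∈ t, List.foldl (fun n x => Nat.min n (rk x)) a t ≤ rk y) ∧
      (List.foldl (fun n x => Nat.min n (rk x)) a t = a ∨
        ∃ y ∈ t, rk y = List.foldl (fun n x => Nat.min n (rk x)) a t) := by
  induction t with
  | nil => intro a; simp
  | cons x t ih =>
    intro a
    obtain ⟨h1, h2, h3⟩ := ih (Nat.min a (rk x))
    have hmm : (Nat.min a (rk x) ≤ a) ∧ (Nat.min a (rk x) ≤ rk x) ∧
        (Nat.min a (rk x) = a ∨ Nat.min a (rk x) = rk x) := by unfold Nat.min; omega
    simp only [List.foldl_cons]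
    refine ⟨by omega, ?_, ?_⟩
    · intro y hy
      rcases List.mem_cons.mp hy with h | h
      · subst h; omega
      · exact h2 y h
    · rcases h3 with h | ⟨y, hy, hrk⟩
      · by_cases hax : a ≤ rk x
        · left; omega
        · right; exact ⟨x, by simp, by omega⟩
      · right; exact ⟨y, by simp [hy], hrk⟩

theorem loopA_chain (av : PySem.Set String) : loopA prefOrder av =
    if PySem.Set.contains av "NISHITA" then some "NISHITA"
    else if PySem.Set.contains av "MULTIPLE_SCATTERING" then some "MULTIPLE_SCATTERING"
    else if PySem.Set.contains av "SINGLE_SCATTERING" then some "SINGLE_SCATTERING"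
    else if PySem.Set.contains av "PREETHAM" then some "PREETHAM"
    else if PySem.Set.contains av "HOSEK_WILKIE" then some "HOSEK_WILKIE"
    else none := rfl

theorem contains_ofList (l : List String) (s : String) :
    (PySem.Set.contains (PySem.Set.ofList l) s = true) ↔ s ∈ l := by
  simp [PySem.Set.contains, PySem.Set.mem_ofList]

-- ===== VERDICT =====
theorem choose_sky_type_spec : Claim_equal_choose_sky_type := by
  intro l _ hpre
  unfold Spec_choose_sky_type
  -- the candidate list of B
  set ys := l.filter (fun t => (rankB.get? t).isSome) with hys_def
  have hys_mem : ∀ s, s ∈ ys ↔ s ∈ l ∧ s ∈ prefOrder := by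
    intro s
    simp [hys_def, List.mem_filter, rankB_isSome]
  obtain ⟨s0, hs0p, hs0l⟩ := hpre
  have hys_ne : ys ≠ [] := by
    intro h
    have : s0 ∈ ys := (hys_mem s0).2 ⟨hs0l, hs0p⟩
    simp [h] at this
  obtain ⟨c, rest, hcr⟩ := List.exists_cons_of_ne_nil hys_ne
  have hc : c ∈ ys := by rw [hcr]; simp
  have hcp : c ∈ prefOrder := ((hys_mem c).1 hc).2
  have hrestp : ∀ x ∈ rest, x ∈ prefOrder := by
    intro x hx
    exact ((hys_mem x).1 (by rw [hcr]; simp [hx])).2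
  -- abbreviate the min rank
  set m := List.foldl (fun n x => Nat.min n (rk x)) (rk c) rest with hm_def
  obtain ⟨hm_le_c, hm_le_rest, hm_attained⟩ := foldl_min_facts rest (rk c)
  have hmin? : PySem.List.min? ys (fun t => (rankB.get? t).getD 0) = some (pstr m) := by
    rw [hcr, min?_eq_foldl_minStep]
    simp only [List.foldl_cons]
    have hstep : minStep none c = some c := rfl
    rw [hstep, hm_def]
    exact foldl_min_pstr rest c hcp hrestp
  have hB : choose_sky_type_alt l = pstr m := by
    unfold choose_sky_type_alt
    show (match PySem.List.min? (List.filter (fun t => (rankB.get? t).isSome) l)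
            (fun t => (rankB.get? t).getD 0) with
          | some mm => mm
          | none => "") = pstr m
    rw [← hys_def, hmin?]
  rw [hB]
  -- facts about m
  have hm4 : m ≤ 4 := le_trans hm_le_c (rk_le c hcp)
  have hmem : pstr m ∈ ys := by
    rcases hm_attained with h | ⟨y, hy, hrk⟩
    · rw [← hm_def] at h; rw [h, pstr_rk c hcp]; exact hc
    · rw [← hm_def] at hrk
      rw [← hrk, pstr_rk y (hrestp y hy)]
      rw [hcr]; simp [hy]
  have hmem_l : pstr m ∈ l := ((hys_mem _).1 hmem).1
  have hlow : ∀ y ∈ ys, m ≤ rk y := by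
    intro y hy
    rw [hcr] at hy
    rcases List.mem_cons.mp hy with h | h
    · subst h; exact hm_le_c
    · exact hm_le_rest y h
  have hnot : ∀ j, j < m → j ≤ 4 → pstr j ∉ l := by
    intro j hj hj4 hin
    have hjp : pstr j ∈ prefOrder := by interval_cases j <;> decide
    have : pstr j ∈ ys := (hys_mem _).2 ⟨hin, hjp⟩
    have h2 := hlow _ this
    have hrkj : rk (pstr j) = j := by interval_cases j <;> decide
    omega
  -- A's chain of membership tests
  unfold choose_sky_type
  show (loopA prefOrder (PySem.Set.ofList l)).getD "" = pstr m
  rw [loopA_chain]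
  interval_cases m
  · simp only [pstr] at hmem_l ⊢
    rw [if_pos ((contains_ofList l "NISHITA").mpr hmem_l)]
    rfl
  · have h0 := hnot 0 (by omega) (by omega)
    simp only [pstr] at hmem_l h0 ⊢
    rw [if_neg (by rw [contains_ofList]; exact h0)]
    rw [if_pos ((contains_ofList l "MULTIPLE_SCATTERING").mpr hmem_l)]
    rfl
  · have h0 := hnot 0 (by omega) (by omega)
    have h1 := hnot 1 (by omega) (by omega)
    simp only [pstr] at hmem_l h0 h1 ⊢
    rw [if_neg (by rw [contains_ofList]; exact h0)]
    rw [if_neg (by rw [contains_ofList]; exact h1)]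
    rw [if_pos ((contains_ofList l "SINGLE_SCATTERING").mpr hmem_l)]
    rfl
  · have h0 := hnot 0 (by omega) (by omega)
    have h1 := hnot 1 (by omega) (by omega)
    have h2 := hnot 2 (by omega) (by omega)
    simp only [pstr] at hmem_l h0 h1 h2 ⊢
    rw [if_neg (by rw [contains_ofList]; exact h0)]
    rw [if_neg (by rw [contains_ofList]; exact h1)]
    rw [if_neg (by rw [contains_ofList]; exact h2)]
    rw [if_pos ((contains_ofList l "PREETHAM").mpr hmem_l)]
    rfl
  · have h0 := hnot 0 (by omega) (by omega)
    have h1 := hnot 1 (by omega) (by omega)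
    have h2 := hnot 2 (by omega) (by omega)
    have h3 := hnot 3 (by omega) (by omega)
    simp only [pstr] at hmem_l h0 h1 h2 h3 ⊢
    rw [if_neg (by rw [contains_ofList]; exact h0)]
    rw [if_neg (by rw [contains_ofList]; exact h1)]
    rw [if_neg (by rw [contains_ofList]; exact h2)]
    rw [if_neg (by rw [contains_ofList]; exact h3)]
    rw [if_pos ((contains_ofList l "HOSEK_WILKIE").mpr hmem_l)]
    rfl
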